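-- pv_equiv track=rewrite | github.com/ItzDevil555/invoicev2 | backend/main.py | score_table
-- ===== SOURCE A (Python) =====
-- def row_text(row):
--     return " ".join(str(cell).strip().lower() for cell in row if str(cell).strip() != "")
--
-- def looks_like_item_header(row):
--     text = row_text(row)
--     header_keywords = [
--         "item", "description", "qty", "quantity", "unit", "price", "rate",
--         "amount", "total", "value", "hs code", "hs", "origin", "country",
--         "gross weight", "net weight", "arabic description"
--     ]
--     matches = sum(1 for keyword in header_keywords if keyword in text)
--     return matches >= 2
--
-- def is_total_row(row):
--     text = row_text(row)
--     total_keywords = [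
--         "subtotal", "sub total", "grand total", "invoice total",
--         "total qty", "total quantity", "total quantities",
--         "total gross weight", "total net weight",
--         "gross weight total", "net weight total", "net total",
--     ]
--
--     if any(keyword in text for keyword in total_keywords):
--         return True
--
--     if "total" in text and not looks_like_item_header(row):
--         return True
--
--     return False
--
-- def score_table(table):
--     if not table:
--         return 0
--
--     rows = len(table)
--     cols = max(len(r) for r in table) if table else 0
--     filled = sum(1 for row in table for cell in row if str(cell).strip() != "")
--
--     header_bonus = 0
--     total_bonus = 0
--
--     for row in table[:5]:
--         if looks_like_item_header(row):
--             header_bonus += 20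
--
--     for row in table:
--         if is_total_row(row):
--             total_bonus += 5
--
--     return (rows * 4) + (cols * 3) + filled + header_bonus + total_bonus
-- ===== SOURCE B (Python) =====
-- HEADER_KEYWORDS = [
--     "item", "description", "qty", "quantity", "unit", "price", "rate",
--     "amount", "total", "value", "hs code", "hs", "origin", "country",
--     "gross weight", "net weight", "arabic description"
-- ]
--
-- TOTAL_KEYWORDS = [
--     "subtotal", "sub total", "grand total", "invoice total",
--     "total qty", "total quantity", "total quantities",
--     "total gross weight", "total net weight",
--     "gross weight total", "net weight total", "net total",
-- ]
--
--
-- def score_table(table):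
--     if not table:
--         return 0
--
--     cols = 0
--     filled = 0
--     header_bonus = 0
--     total_bonus = 0
--
--     for i, row in enumerate(table):
--         if len(row) > cols:
--             cols = len(row)
--         kept = [s for s in (str(cell).strip() for cell in row) if s != ""]
--         filled += len(kept)
--         text = " ".join(s.lower() for s in kept)
--         is_header = sum(1 for kw in HEADER_KEYWORDS if kw in text) >= 2
--         if i < 5 and is_header:
--             header_bonus += 20
--         if any(kw in text for kw in TOTAL_KEYWORDS) or ("total" in text and not is_header):
--             total_bonus += 5
--
--     return len(table) * 4 + cols * 3 + filled + header_bonus + total_bonus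
-- ===== Notes on version B (the rewrite author's own statement) =====
-- stated objective: alternative
-- what changed: A's four separate passes over the rows (column max, fill count, header scan of table[:5], total scan) are fused into a single enumerate loop that strips each row and builds its joined text once, maintaining four accumulators.
import Mathlib
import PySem

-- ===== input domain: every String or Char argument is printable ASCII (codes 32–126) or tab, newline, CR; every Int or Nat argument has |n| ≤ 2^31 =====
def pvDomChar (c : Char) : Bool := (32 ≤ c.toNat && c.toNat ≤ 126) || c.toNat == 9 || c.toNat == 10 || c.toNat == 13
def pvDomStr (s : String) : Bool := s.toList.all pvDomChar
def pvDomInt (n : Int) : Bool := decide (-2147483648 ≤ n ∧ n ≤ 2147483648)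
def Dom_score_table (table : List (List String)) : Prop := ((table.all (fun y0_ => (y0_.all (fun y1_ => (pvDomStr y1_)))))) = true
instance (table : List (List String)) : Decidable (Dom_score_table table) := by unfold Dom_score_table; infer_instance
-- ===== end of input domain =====

-- B fuses A's four separate row passes (max, fill count, header scan of the first 5 rows, total scan)
-- into one enumerate-style loop that builds each row's text once; objective: alternative decomposition.

-- ===== PORT A =====
def headerKeywords : List String :=
  ["item", "description", "qty", "quantity", "unit", "price", "rate",
   "amount", "total", "value", "hs code", "hs", "origin", "country",
   "gross weight", "net weight", "arabic description"]

def totalKeywords : List String :=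
  ["subtotal", "sub total", "grand total", "invoice total",
   "total qty", "total quantity", "total quantities",
   "total gross weight", "total net weight",
   "gross weight total", "net weight total", "net total"]

def row_text (row : List String) : String :=
  PySem.Str.join " "
    ((row.filter (fun c => PySem.Str.strip c != "")).map (fun c => PySem.Str.lower (PySem.Str.strip c)))

def looks_like_item_header (row : List String) : Bool :=
  let text := row_text row
  decide (2 ≤ headerKeywords.countP (fun kw => PySem.Str.isIn kw text))

def is_total_row (row : List String) : Bool :=
  let text := row_text row
  if totalKeywords.any (fun kw => PySem.Str.isIn kw text) then true
  else if PySem.Str.isIn "total" text && !(looks_like_item_header row) then true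
  else false

def score_table (table : List (List String)) : Int :=
  if table = [] then 0
  else
    let rows : Int := (table.length : Int)
    let cols : Int := (PySem.List.max? (table.map (fun r => (r.length : Int))) id).getD 0
    let filled : Int :=
      table.foldl (fun acc row => acc + ((row.filter (fun c => PySem.Str.strip c != "")).length : Int)) 0
    let header_bonus : Int :=
      (table.take 5).foldl (fun acc row => if looks_like_item_header row then acc + 20 else acc) 0
    let total_bonus : Int :=
      table.foldl (fun acc row => if is_total_row row then acc + 5 else acc) 0
    rows * 4 + cols * 3 + filled + header_bonus + total_bonus

-- ===== PORT B =====
-- single pass: index, running column max, fill count, header bonus (rows 0..4), total bonus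
def scoreLoop : List (List String) → Nat → Int → Int → Int → Int → Int × Int × Int × Int
  | [], _, c, f, h, t => (c, f, h, t)
  | row :: rest, i, c, f, h, t =>
    let c' := if (row.length : Int) > c then (row.length : Int) else c
    let kept := (row.map PySem.Str.strip).filter (fun s => s != "")
    let f' := f + (kept.length : Int)
    let text := PySem.Str.join " " (kept.map PySem.Str.lower)
    let isHeader : Bool := decide (2 ≤ headerKeywords.countP (fun kw => PySem.Str.isIn kw text))
    let h' := if i < 5 then (if isHeader then h + 20 else h) else h
    let t' := if (totalKeywords.any (fun kw => PySem.Str.isIn kw text))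
                 || (PySem.Str.isIn "total" text && !isHeader) then t + 5 else t
    scoreLoop rest (i + 1) c' f' h' t'

def score_table_alt (table : List (List String)) : Int :=
  if table = [] then 0
  else
    match scoreLoop table 0 0 0 0 0 with
    | (cols, filled, header_bonus, total_bonus) =>
      (table.length : Int) * 4 + cols * 3 + filled + header_bonus + total_bonus

-- ===== PRECONDITION & SPEC =====
def Spec_score_table (table : List (List String)) (out : Int) : Prop := out = score_table_alt table
instance (table : List (List String)) (out : Int) : Decidable (Spec_score_table table out) := by unfold Spec_score_table; infer_instance

-- ===== CLAIM (what is proved, stated in full; the proofs are below) =====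
def Claim_equal_score_table : Prop := ∀ (table : List (List String)), Dom_score_table table → Spec_score_table table (score_table table)

-- ===== LEMMAS AND PROOFS =====

theorem kept_eq (row : List String) :
    (row.map PySem.Str.strip).filter (fun s => s != "")
      = (row.filter (fun c => PySem.Str.strip c != "")).map PySem.Str.strip := by
  rw [List.filter_map]
  rfl

theorem text_eq (row : List String) :
    PySem.Str.join " " (((row.map PySem.Str.strip).filter (fun s => s != "")).map PySem.Str.lower)
      = row_text row := by
  rw [kept_eq, List.map_map, row_text]
  rfl

theorem keptLen_eq (row : List String) :
    (((row.map PySem.Str.strip).filter (fun s => s != "")).length : Int)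
      = ((row.filter (fun c => PySem.Str.strip c != "")).length : Int) := by
  rw [kept_eq, List.length_map]

theorem hdr_eq (row : List String) :
    (decide (2 ≤ headerKeywords.countP
        (fun kw => PySem.Str.isIn kw
          (PySem.Str.join " " (((row.map PySem.Str.strip).filter (fun s => s != "")).map PySem.Str.lower)))))
      = looks_like_item_header row := by
  rw [text_eq]; rfl

theorem tot_eq (row : List String) :
    ((totalKeywords.any (fun kw => PySem.Str.isIn kw
        (PySem.Str.join " " (((row.map PySem.Str.strip).filter (fun s => s != "")).map PySem.Str.lower))))
      || (PySem.Str.isIn "total"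
            (PySem.Str.join " " (((row.map PySem.Str.strip).filter (fun s => s != "")).map PySem.Str.lower))
          && !(looks_like_item_header row)))
      = is_total_row row := by
  rw [text_eq, is_total_row]
  cases h1 : totalKeywords.any (fun kw => PySem.Str.isIn kw (row_text row)) <;>
    cases h2 : PySem.Str.isIn "total" (row_text row) && !(looks_like_item_header row) <;> simp

theorem loop_spec (l : List (List String)) : ∀ (i : Nat) (c f h t : Int),
    scoreLoop l i c f h t =
      ( l.foldl (fun acc r => if (r.length : Int) > acc then (r.length : Int) else acc) c,
        l.foldl (fun acc row => acc + ((row.filter (fun cl => PySem.Str.strip cl != "")).length : Int)) f,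
        (l.take (5 - i)).foldl (fun acc row => if looks_like_item_header row then acc + 20 else acc) h,
        l.foldl (fun acc row => if is_total_row row then acc + 5 else acc) t ) := by
  induction l with
  | nil => intro i c f h t; simp [scoreLoop]
  | cons row rest ih =>
    intro i c f h t
    simp only [scoreLoop]
    rw [ih, keptLen_eq, hdr_eq, tot_eq]
    by_cases hi : i < 5
    · have h5 : 5 - i = (5 - (i + 1)) + 1 := by omega
      simp only [List.foldl_cons, if_pos hi, h5, List.take_succ_cons]
    · have h5 : 5 - i = 0 := by omega
      have h5' : 5 - (i + 1) = 0 := by omega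
      simp only [List.foldl_cons, if_neg hi, h5, h5', List.take_zero]

theorem max?_cons_eq (x : Int) (xs : List Int) :
    PySem.List.max? (x :: xs) id
      = some (xs.foldl (fun acc y => if y > acc then y else acc) x) := by
  induction xs generalizing x with
  | nil => rfl
  | cons y ys ih =>
    have step : PySem.List.max? (x :: y :: ys) id
        = PySem.List.max? ((if x < y then y else x) :: ys) id := by
      simp only [PySem.List.max?, List.foldl_cons, id_eq]
      by_cases h : x < y <;> simp [h]
    rw [step, ih]
    simp only [List.foldl_cons]

theorem cols_eq (r : List String) (rest : List (List String)) :
    ((r :: rest).foldl (fun acc row => if ((row.length : Int)) > acc then ((row.length : Int)) else acc) 0)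
      = (PySem.List.max? ((r :: rest).map (fun row => ((row.length : Int)))) id).getD 0 := by
  simp only [List.map_cons]
  rw [max?_cons_eq, Option.getD_some, List.foldl_map, List.foldl_cons]
  have h0 : (if ((r.length : Int)) > (0 : Int) then ((r.length : Int)) else (0 : Int)) = ((r.length : Int)) := by
    split <;> omega
  rw [h0]

-- ===== VERDICT (by name: the statement is the Claim_ definition above) =====
theorem score_table_spec : Claim_equal_score_table := by
  intro table _
  unfold Spec_score_table
  cases table with
  | nil => rfl
  | cons r rest =>
    simp only [score_table, score_table_alt, if_neg (List.cons_ne_nil r rest)]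
    rw [loop_spec, cols_eq]
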